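-- pv_equiv track=rewrite | github.com/tberic/AdventOfCode | 2023/12/1.py | consistent
-- ===== SOURCE A (Python) =====
-- def consistent(s, groups):
--     i = 0
--     pos = 0
--     size = 0
--     s += '.'
--     while i < len(s):
--         if s[i] == '#':
--             size += 1
--         if s[i] == '.' and size > 0:
--             if pos >= len(groups):
--                 return 0
--             if size != groups[pos]:
--                 return 0
--             size = 0
--             pos += 1
--
--         i += 1
--
--     if pos == len(groups):
--         return 1
--     return 0
-- ===== SOURCE B (Python) =====
-- def consistent(s, groups):
--     runs = [t.count('#') for t in s.split('.') if '#' in t]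
--     return 1 if runs == list(groups) else 0
-- ===== Notes on version B (the rewrite author's own statement) =====
-- stated objective: simpler
-- what changed: Replaces A's index-driven while loop with (pos, size) accumulators and three early returns by splitting on '.', counting '#' in each token that has one, and comparing the resulting run list to groups with a single equality.
import Mathlib
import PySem

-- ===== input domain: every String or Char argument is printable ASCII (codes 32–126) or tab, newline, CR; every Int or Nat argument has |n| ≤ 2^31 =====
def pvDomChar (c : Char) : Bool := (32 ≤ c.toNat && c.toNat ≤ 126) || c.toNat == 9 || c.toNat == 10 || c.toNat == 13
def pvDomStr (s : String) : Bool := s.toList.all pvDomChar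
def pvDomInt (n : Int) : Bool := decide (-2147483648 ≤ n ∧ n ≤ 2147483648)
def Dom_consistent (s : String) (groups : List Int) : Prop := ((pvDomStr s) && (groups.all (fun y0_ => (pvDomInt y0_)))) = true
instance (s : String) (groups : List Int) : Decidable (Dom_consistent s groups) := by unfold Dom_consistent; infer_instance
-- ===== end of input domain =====

-- B replaces A's index/accumulator scan by split('.') + per-token '#' counts compared to groups in one equality (objective: simpler).

-- ===== PORT A =====
-- A's while loop over s + '.' with state (pos, size); the three early `return 0`s stay branches
def consistentLoop (groups : List Int) : List Char → Nat → Nat → Int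
  | [], pos, _ => if pos = groups.length then 1 else 0
  | c :: rest, pos, size =>
    let size' := if c = '#' then size + 1 else size
    if c = '.' ∧ 0 < size' then
      if groups.length ≤ pos then 0
      else if (size' : Int) ≠ groups.getD pos 0 then 0
      else consistentLoop groups rest (pos + 1) 0
    else consistentLoop groups rest pos size'

def consistent (s : String) (groups : List Int) : Int :=
  consistentLoop groups (s ++ ".").toList 0 0

-- ===== PORT B =====
-- Source B: runs = [t.count('#') for t in s.split('.') if '#' in t]; 1 if runs == list(groups) else 0
-- the stdlib call s.split('.') (single-char separator) is ported as List.splitOn on the char list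
def consistent_alt (s : String) (groups : List Int) : Int :=
  let runs := ((s.toList.splitOn '.').filter (fun t => t.contains '#')).map
      (fun t => (t.count '#' : Int))
  if runs = groups then 1 else 0

-- ===== PRECONDITION & SPEC =====
def Spec_consistent (s : String) (groups : List Int) (out : Int) : Prop := out = consistent_alt s groups
instance (s : String) (groups : List Int) (out : Int) : Decidable (Spec_consistent s groups out) := by unfold Spec_consistent; infer_instance

-- ===== CLAIM (what is proved, stated in full; the proofs are below) =====
def Claim_equal_consistent : Prop := ∀ (s : String) (groups : List Int), Dom_consistent s groups → Spec_consistent s groups (consistent s groups)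

-- ===== LEMMAS AND PROOFS =====

-- unfolding equations for A's loop, one per character class
theorem consistentLoop_nil (g : List Int) (pos size : Nat) :
    consistentLoop g [] pos size = if pos = g.length then 1 else 0 := rfl

theorem consistentLoop_hash (g : List Int) (r : List Char) (pos size : Nat) :
    consistentLoop g ('#' :: r) pos size = consistentLoop g r pos (size + 1) := by
  simp [consistentLoop]

theorem consistentLoop_other (g : List Int) {c : Char} (r : List Char) (pos size : Nat)
    (hc1 : c ≠ '.') (hc2 : c ≠ '#') :
    consistentLoop g (c :: r) pos size = consistentLoop g r pos size := by
  simp [consistentLoop, hc1, hc2]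

theorem consistentLoop_dot_zero (g : List Int) (r : List Char) (pos : Nat) :
    consistentLoop g ('.' :: r) pos 0 = consistentLoop g r pos 0 := by
  simp [consistentLoop]

theorem consistentLoop_dot_pos (g : List Int) (r : List Char) (pos size : Nat) (h : 0 < size) :
    consistentLoop g ('.' :: r) pos size =
      if g.length ≤ pos then 0
      else if (size : Int) ≠ g.getD pos 0 then 0
      else consistentLoop g r (pos + 1) 0 := by
  simp [consistentLoop, h]

/-- Run lengths of `cs` with a pending run of `size` already-seen `#`s. -/
def pendRuns : List Char → Nat → List Int
  | [], size => if 0 < size then [(size : Int)] else []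
  | c :: r, size =>
    if c = '.' then (if 0 < size then (size : Int) :: pendRuns r 0 else pendRuns r 0)
    else pendRuns r (if c = '#' then size + 1 else size)

/-- B's run list, as a function of the token list with the pending prefix attached. -/
def runsOf (size : Nat) (ts : List (List Char)) : List Int :=
  ((ts.modifyHead (fun t => List.replicate size '#' ++ t)).filter (fun t => t.contains '#')).map
    (fun t => (t.count '#' : Int))

theorem modifyHead_fun_id (ts : List (List Char)) : ts.modifyHead (fun t => t) = ts := by
  cases ts <;> rfl

theorem runsOf_zero (ts : List (List Char)) :
    runsOf 0 ts = (ts.filter (fun t => t.contains '#')).map (fun t => (t.count '#' : Int)) := by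
  cases ts with
  | nil => rfl
  | cons h t => simp [runsOf]

theorem pendRuns_eq_runsOf (cs : List Char) : ∀ size : Nat,
    pendRuns cs size = runsOf size (cs.splitOn '.') := by
  induction cs with
  | nil =>
    intro size
    by_cases h : 0 < size
    · have hm : '#' ∈ List.replicate size '#' := by
        rw [List.mem_replicate]; exact ⟨by omega, rfl⟩
      simp [pendRuns, runsOf, List.splitOn, List.splitOnP_nil, h, hm, List.count_replicate]
    · have h0 : size = 0 := by omega
      subst h0
      simp [pendRuns, runsOf, List.splitOn, List.splitOnP_nil]
  | cons c r ih =>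
    intro size
    by_cases hdot : c = '.'
    · subst hdot
      have hsp : ('.' :: r).splitOn '.' = [] :: r.splitOn '.' := by
        simp [List.splitOn, List.splitOnP_cons]
      rw [hsp]
      by_cases h : 0 < size
      · have hm : '#' ∈ List.replicate size '#' := by
          rw [List.mem_replicate]; exact ⟨by omega, rfl⟩
        simp [pendRuns, h, ih 0, runsOf_zero, runsOf, hm, List.count_replicate,
          modifyHead_fun_id]
      · have h0 : size = 0 := by omega
        subst h0
        simp [pendRuns, ih 0, runsOf_zero, runsOf, modifyHead_fun_id]
    · have hsp : (c :: r).splitOn '.' = (r.splitOn '.').modifyHead (fun t => c :: t) := by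
        simp [List.splitOn, List.splitOnP_cons, hdot]
      obtain ⟨h, t, hht⟩ : ∃ h t, r.splitOn '.' = h :: t := by
        rcases hr : r.splitOn '.' with _ | ⟨h, t⟩
        · exact absurd hr (List.splitOnP_ne_nil _ r)
        · exact ⟨h, t, rfl⟩
      by_cases hhash : c = '#'
      · subst hhash
        rw [pendRuns, if_neg hdot, if_pos rfl, ih (size + 1), hsp, hht]
        have hm1 : '#' ∈ List.replicate (size + 1) '#' ++ h := by
          rw [List.mem_append, List.mem_replicate]; exact Or.inl ⟨by omega, rfl⟩
        have hm2 : '#' ∈ List.replicate size '#' ++ '#' :: h := by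
          rw [List.mem_append]; exact Or.inr (List.mem_cons_self)
        have hcnt : (List.replicate (size + 1) '#' ++ h).count '#' =
            (List.replicate size '#' ++ '#' :: h).count '#' := by
          simp [List.count_append, List.count_replicate, List.count_cons]
          omega
        simp only [runsOf, List.modifyHead_cons, List.filter_cons]
        rw [if_pos (by simpa using hm1), if_pos (by simpa using hm2)]
        rw [List.map_cons, List.map_cons, hcnt]
      · rw [pendRuns, if_neg hdot, if_neg hhash, ih size, hsp, hht]
        have hmemiff : ('#' ∈ List.replicate size '#' ++ c :: h) ↔
            ('#' ∈ List.replicate size '#' ++ h) := by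
          rw [List.mem_append, List.mem_append, List.mem_cons]
          constructor
          · rintro (h1 | h1 | h1)
            · exact Or.inl h1
            · exact absurd h1.symm hhash
            · exact Or.inr h1
          · rintro (h1 | h1)
            · exact Or.inl h1
            · exact Or.inr (Or.inr h1)
        have hcount : (List.replicate size '#' ++ c :: h).count '#' =
            (List.replicate size '#' ++ h).count '#' := by
          rw [List.count_append, List.count_append, List.count_cons]
          simp [hhash, Ne.symm hhash]
        simp only [runsOf, List.modifyHead_cons, List.filter_cons]
        by_cases hmem : '#' ∈ List.replicate size '#' ++ h
        · rw [if_pos (by simpa using hmem), if_pos (by simpa using (hmemiff.mpr hmem))]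
          rw [List.map_cons, List.map_cons, hcount]
        · rw [if_neg (by simpa using hmem),
            if_neg (by simpa using (fun hc => hmem (hmemiff.mp hc)))]
    termination_by cs => cs.length

theorem drop_eq_singleton_iff (groups : List Int) (pos : Nat) (a : Int) :
    groups.drop pos = [a] ↔
      pos < groups.length ∧ groups.getD pos 0 = a ∧ pos + 1 = groups.length := by
  constructor
  · intro h
    have hlen : (groups.drop pos).length = 1 := by rw [h]; rfl
    rw [List.length_drop] at hlen
    have hlt : pos < groups.length := by omega
    rw [List.drop_eq_getElem_cons hlt] at h
    obtain ⟨h1, _⟩ := List.cons.inj h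
    exact ⟨hlt, by rw [List.getD_eq_getElem _ _ hlt]; exact h1, by omega⟩
  · rintro ⟨hlt, hget, hlen⟩
    rw [List.drop_eq_getElem_cons hlt, List.drop_eq_nil_of_le (by omega)]
    rw [List.getD_eq_getElem _ _ hlt] at hget
    rw [hget]

theorem consistentLoop_eq (groups : List Int) (cs : List Char) :
    ∀ pos size : Nat, pos ≤ groups.length →
    consistentLoop groups (cs ++ ['.']) pos size =
      (if pendRuns cs size = groups.drop pos then 1 else 0) := by
  induction cs with
  | nil =>
    intro pos size hpos
    by_cases h : 0 < size
    · rw [List.nil_append, consistentLoop_dot_pos groups [] pos size h]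
      simp only [pendRuns, if_pos h]
      by_cases hge : groups.length ≤ pos
      · rw [if_pos hge, List.drop_eq_nil_of_le hge, if_neg (by simp)]
      · rw [if_neg hge]
        have hlt : pos < groups.length := by omega
        by_cases heq : (size : Int) = groups.getD pos 0
        · rw [if_neg (not_not_intro heq), consistentLoop_nil]
          by_cases hl : pos + 1 = groups.length
          · rw [if_pos hl,
              if_pos ((drop_eq_singleton_iff groups pos _).mpr ⟨hlt, heq.symm, hl⟩).symm]
          · rw [if_neg hl,
              if_neg (fun hc => hl ((drop_eq_singleton_iff groups pos _).mp hc.symm).2.2)]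
        · rw [if_pos heq,
            if_neg (fun hc => heq ((drop_eq_singleton_iff groups pos _).mp hc.symm).2.1.symm)]
    · have h0 : size = 0 := by omega
      subst h0
      rw [List.nil_append, consistentLoop_dot_zero, consistentLoop_nil]
      simp only [pendRuns, if_neg h]
      by_cases hl : pos = groups.length
      · rw [if_pos hl, if_pos (List.drop_eq_nil_of_le (le_of_eq hl.symm)).symm]
      · rw [if_neg hl, if_neg (fun hc => hl (by
          have := List.drop_eq_nil_iff.mp hc.symm; omega))]
  | cons c r ih =>
    intro pos size hpos
    rw [List.cons_append]
    by_cases hdot : c = '.'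
    · subst hdot
      by_cases h : 0 < size
      · have hpr : pendRuns ('.' :: r) size = (size : Int) :: pendRuns r 0 := by
          simp [pendRuns, h]
        rw [consistentLoop_dot_pos groups _ pos size h, hpr]
        by_cases hge : groups.length ≤ pos
        · rw [if_pos hge, List.drop_eq_nil_of_le hge, if_neg (by simp)]
        · rw [if_neg hge]
          have hlt : pos < groups.length := by omega
          rw [List.drop_eq_getElem_cons hlt]
          by_cases heq : (size : Int) = groups.getD pos 0
          · rw [if_neg (not_not_intro heq), ih (pos + 1) 0 (by omega)]
            have hhead : groups[pos] = (size : Int) := by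
              rw [heq]; exact (List.getD_eq_getElem _ _ hlt).symm
            rw [hhead]
            by_cases h2 : pendRuns r 0 = groups.drop (pos + 1)
            · rw [if_pos h2, if_pos (by rw [h2])]
            · rw [if_neg h2, if_neg (fun hc => h2 (List.cons.inj hc).2)]
          · rw [if_pos heq]
            rw [if_neg (fun hc => heq (by
              have h1 := (List.cons.inj hc).1
              rw [List.getD_eq_getElem _ _ hlt]; exact h1))]
      · have h0 : size = 0 := by omega
        subst h0
        have hpr : pendRuns ('.' :: r) 0 = pendRuns r 0 := by simp [pendRuns]
        rw [consistentLoop_dot_zero, hpr, ih pos 0 hpos]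
    · by_cases hhash : c = '#'
      · subst hhash
        have hpr : pendRuns ('#' :: r) size = pendRuns r (size + 1) := by
          simp [pendRuns, hdot]
        rw [consistentLoop_hash, hpr, ih pos (size + 1) hpos]
      · have hpr : pendRuns (c :: r) size = pendRuns r size := by
          simp [pendRuns, hdot, hhash]
        rw [consistentLoop_other groups (r ++ ['.']) pos size hdot hhash, hpr, ih pos size hpos]

-- ===== VERDICT (by name: the statement is the Claim_ definition above) =====
theorem consistent_spec : Claim_equal_consistent := by
  intro s groups _
  unfold Spec_consistent consistent consistent_alt
  have hcat : (s ++ ".").toList = s.toList ++ ['.'] := by simp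
  rw [hcat, consistentLoop_eq groups s.toList 0 0 (Nat.zero_le _),
    pendRuns_eq_runsOf, runsOf_zero, List.drop_zero]
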